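-- pv_equiv track=rewrite | github.com/YuHsiangLo/python_refresher_workshop | eval.py | syllabify_baseline
-- ===== SOURCE A (Python) =====
-- def syllabify_baseline(ipa_list):
--     syllabified = []
--     for i, symbol in enumerate(ipa_list):
--         if i % 2 == 1 and i != len(ipa_list) - 1:  # add '.' if the index is odd and not the last one
--             syllabified.extend([symbol, '.'])
--         else:
--             syllabified.append(symbol)
--
--     return syllabified
-- ===== SOURCE B (Python) =====
-- def syllabify_baseline(ipa_list):
--     out = []
--     n = len(ipa_list)
--     j = 0
--     while j < n:
--         chunk = ipa_list[j:j+2]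
--         out.extend(chunk)
--         if len(chunk) == 2 and j + 1 != n - 1:
--             out.append('.')
--         j += 2
--     return out
-- ===== Notes on version B (the rewrite author's own statement) =====
-- stated objective: alternative
-- what changed: Replaced the per-element enumerate loop with an index-parity test by a while loop that walks the list in two-element slices, extending the output with each chunk and appending '.' only after a full non-final chunk.
import Mathlib
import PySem

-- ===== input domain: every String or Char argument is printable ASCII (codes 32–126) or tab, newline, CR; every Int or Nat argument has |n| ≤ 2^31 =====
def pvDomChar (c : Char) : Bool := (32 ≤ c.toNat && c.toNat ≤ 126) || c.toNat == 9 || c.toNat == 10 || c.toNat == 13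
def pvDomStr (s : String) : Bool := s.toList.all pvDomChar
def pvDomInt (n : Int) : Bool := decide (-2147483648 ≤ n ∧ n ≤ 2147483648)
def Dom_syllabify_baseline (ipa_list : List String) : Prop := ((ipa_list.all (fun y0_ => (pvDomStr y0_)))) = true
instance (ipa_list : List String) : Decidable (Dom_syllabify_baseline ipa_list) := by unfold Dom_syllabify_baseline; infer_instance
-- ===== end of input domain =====

-- B walks the list in two-element slices instead of testing index parity per element; alternative decomposition, same cost.

-- ===== PORT A =====
-- literal port of A: fold over enumerate, appending [symbol, '.'] at odd non-last indices
def syllabify_baseline (ipa_list : List String) : List String :=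
  (PySem.List.enumerate ipa_list 0).foldl
    (fun acc p =>
      if p.1 % 2 = 1 ∧ p.1 ≠ (ipa_list.length : Int) - 1 then acc ++ [p.2, "."]
      else acc ++ [p.2]) []

-- ===== PORT B =====
-- literal port of B's while loop: j steps by 2, chunk = ipa_list[j:j+2]
def syllabify_baseline_alt_go (l : List String) (n : Nat) (acc : List String) (j : Nat) : List String :=
  if j < n then
    let chunk := PySem.List.slice l (some (j : Int)) (some ((j : Int) + 2))
    let acc2 := acc ++ chunk
    let acc3 := if chunk.length = 2 ∧ (j : Int) + 1 ≠ (n : Int) - 1 then acc2 ++ ["."] else acc2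
    syllabify_baseline_alt_go l n acc3 (j + 2)
  else acc
termination_by n - j

def syllabify_baseline_alt (ipa_list : List String) : List String :=
  syllabify_baseline_alt_go ipa_list ipa_list.length [] 0

-- ===== PRECONDITION & SPEC =====
def Spec_syllabify_baseline (ipa_list : List String) (out : List String) : Prop := out = syllabify_baseline_alt ipa_list
instance (ipa_list : List String) (out : List String) : Decidable (Spec_syllabify_baseline ipa_list out) := by unfold Spec_syllabify_baseline; infer_instance

-- ===== CLAIM (what is proved, stated in full; the proofs are below) =====
def Claim_equal_syllabify_baseline : Prop := ∀ (ipa_list : List String), Dom_syllabify_baseline ipa_list → Spec_syllabify_baseline ipa_list (syllabify_baseline ipa_list)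

-- ===== LEMMAS AND PROOFS =====

-- common recursive characterisation: pairs separated by '.', no '.' at the end
def pairChunks : List String → List String
  | [] => []
  | [x] => [x]
  | x :: y :: rest => x :: y :: ((if rest = [] then [] else ["."]) ++ pairChunks rest)

-- A-side: value of A's fold starting at index k (n fixed)
def gA (n : Int) (k : Int) : List String → List String
  | [] => []
  | x :: xs => (if k % 2 = 1 ∧ k ≠ n - 1 then [x, "."] else [x]) ++ gA n (k + 1) xs

theorem foldl_enum_gA (n : Int) :
    ∀ (l : List String) (k : Int) (acc : List String),
      (PySem.List.enumerate l k).foldl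
        (fun acc p => if p.1 % 2 = 1 ∧ p.1 ≠ n - 1 then acc ++ [p.2, "."] else acc ++ [p.2]) acc
      = acc ++ gA n k l := by
  intro l
  induction l with
  | nil => intro k acc; simp [PySem.List.enumerate_nil, gA]
  | cons x xs ih =>
      intro k acc
      simp only [PySem.List.enumerate_cons, List.foldl_cons, gA, ih]
      split_ifs with h <;> simp

theorem gA_eq_pairChunks :
    ∀ (l : List String) (k : Nat), k % 2 = 0 → gA ((k : Int) + l.length) (k : Int) l = pairChunks l := by
  intro l
  induction l using pairChunks.induct with
  | case1 => intro k _; simp [gA, pairChunks]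
  | case2 x =>
      intro k hk
      have h1 : ¬ ((k : Int) % 2 = 1 ∧ (k : Int) ≠ (k : Int) + (([x] : List String).length : Int) - 1) := by
        intro ⟨h, _⟩; omega
      simp only [gA, pairChunks]
      rw [if_neg (by simpa using h1)]
      simp
  | case3 x y rest ih =>
      intro k hk
      have hlen : ((x :: y :: rest : List String).length : Int) = (rest.length : Int) + 2 := by
        simp; omega
      simp only [gA]
      rw [if_neg (by rw [hlen]; intro ⟨h, _⟩; omega :
            ¬ ((k : Int) % 2 = 1 ∧ (k : Int) ≠ (k : Int) + ((x :: y :: rest : List String).length : Int) - 1))]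
      by_cases hr : rest = []
      · subst hr
        rw [if_neg (by rw [hlen]; intro ⟨_, h⟩; simp at h ⊢; omega :
              ¬ (((k : Int) + 1) % 2 = 1 ∧ (k : Int) + 1 ≠ (k : Int) + ((x :: y :: ([] : List String)).length : Int) - 1))]
        simp [gA, pairChunks]
      · have hrl : (0 : Int) < rest.length := by
          have := List.length_pos_of_ne_nil hr; omega
        rw [if_pos (by rw [hlen]; exact ⟨by omega, by omega⟩ :
              (((k : Int) + 1) % 2 = 1 ∧ (k : Int) + 1 ≠ (k : Int) + ((x :: y :: rest : List String).length : Int) - 1))]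
        have ih' := ih (k + 2) (by omega)
        rw [show (((k + 2 : Nat) : Int)) = (k : Int) + 2 by push_cast; ring] at ih'
        rw [show (k : Int) + 1 + 1 = (k : Int) + 2 by ring]
        rw [show (k : Int) + ((x :: y :: rest : List String).length : Int) = (k : Int) + 2 + rest.length by rw [hlen]; ring]
        rw [ih']
        simp [pairChunks, hr]

-- B-side: the while loop computes acc ++ pairChunks (l.drop j)
theorem goB_eq_pairChunks (l : List String) :
    ∀ (j : Nat) (acc : List String),
      syllabify_baseline_alt_go l l.length acc j = acc ++ pairChunks (l.drop j) := by
  intro j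
  induction hj : l.length - j using Nat.strong_induction_on generalizing j with
  | _ m ih =>
    intro acc
    rw [syllabify_baseline_alt_go]
    by_cases h : j < l.length
    · rw [if_pos h]
      have hslice : PySem.List.slice l (some (j : Int)) (some ((j : Int) + 2)) = (l.drop j).take 2 := by
        have := PySem.List.slice_natCast_add l j 2
        simpa using this
      have hd : l.drop j ≠ [] := by
        intro hnil
        have hld := List.length_drop (l := l) (i := j)
        rw [hnil] at hld; simp at hld; omega
      obtain ⟨x, d, hx⟩ := List.exists_cons_of_ne_nil hd
      have hldrop := List.length_drop (l := l) (i := j)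
      cases d with
      | nil =>
          have hlen1 : l.length - j = 1 := by rw [hx] at hldrop; simp at hldrop; omega
          have hch : PySem.List.slice l (some (j : Int)) (some ((j : Int) + 2)) = [x] := by
            rw [hslice, hx]; rfl
          rw [hch]
          simp only
          rw [if_neg (by intro ⟨h2, _⟩; simp at h2 :
                ¬ (([x] : List String).length = 2 ∧ (j : Int) + 1 ≠ (l.length : Int) - 1))]
          rw [syllabify_baseline_alt_go, if_neg (by omega : ¬ j + 2 < l.length), hx]
          simp [pairChunks]
      | cons y rest =>
          have hlen2 : l.length - j = rest.length + 2 := by rw [hx] at hldrop; simp at hldrop; omega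
          have hch : PySem.List.slice l (some (j : Int)) (some ((j : Int) + 2)) = [x, y] := by
            rw [hslice, hx]; rfl
          have hdrop2 : l.drop (j + 2) = rest := by
            have h22 : l.drop (j + 2) = (l.drop j).drop 2 := by rw [List.drop_drop]
            rw [h22, hx]; rfl
          have ihrec := ih (l.length - (j + 2)) (by omega) (j + 2) rfl
          rw [hch]
          simp only
          by_cases hr : rest = []
          · have h0 : rest.length = 0 := by rw [hr]; rfl
            have hn : l.length = j + 2 := by omega
            rw [if_neg (by intro ⟨_, hne⟩; apply hne; rw [hn]; push_cast; ring :
                  ¬ (([x, y] : List String).length = 2 ∧ (j : Int) + 1 ≠ (l.length : Int) - 1))]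
            rw [ihrec, hdrop2, hx, hr]
            simp [pairChunks]
          · have hrl : 0 < rest.length := List.length_pos_of_ne_nil hr
            have hne : (j : Int) + 1 ≠ (l.length : Int) - 1 := by
              have : l.length = j + rest.length + 2 := by omega
              rw [this]; push_cast; omega
            rw [if_pos (⟨rfl, hne⟩ :
                  (([x, y] : List String).length = 2 ∧ (j : Int) + 1 ≠ (l.length : Int) - 1))]
            rw [ihrec, hdrop2, hx]
            simp [pairChunks, hr]
    · rw [if_neg h, List.drop_eq_nil_of_le (by omega), pairChunks]
      simp

-- ===== VERDICT (by name: the statement is the Claim_ definition above) =====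
theorem syllabify_baseline_spec : Claim_equal_syllabify_baseline := by
  intro l _
  unfold Spec_syllabify_baseline syllabify_baseline syllabify_baseline_alt
  rw [foldl_enum_gA, goB_eq_pairChunks]
  simp only [List.nil_append, List.drop_zero]
  have := gA_eq_pairChunks l 0 rfl
  simpa using this
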